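-- pv_equiv track=rewrite | github.com/dawei0716/evil-hangman | evilHangman.py | checkAvailableWordLen
-- ===== SOURCE A (Python) =====
-- def checkAvailableWordLen(listOfWords):
--     wordLengths = list()
--     for word in range(len(listOfWords)):
--         length = len(listOfWords[word])
--         if(length not in wordLengths):
--             wordLengths.append(length)
--     wordLengths.sort()
--     return wordLengths
-- ===== SOURCE B (Python) =====
-- def checkAvailableWordLen(listOfWords):
--     # sort-first then adjacent-run dedup (A dedups first with a membership scan, then sorts)
--     lengths = sorted(len(word) for word in listOfWords)
--     result = []
--     for x in lengths:
--         if not result or result[-1] != x: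
--             result.append(x)
--     return result
-- ===== Notes on version B (the rewrite author's own statement) =====
-- stated objective: alternative
-- what changed: A dedups first via a linear membership scan of the accumulator inside the loop and sorts afterwards; B sorts the full multiset of lengths first and then removes duplicates in one adjacent-run pass, eliminating the inner scan.
import Mathlib
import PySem

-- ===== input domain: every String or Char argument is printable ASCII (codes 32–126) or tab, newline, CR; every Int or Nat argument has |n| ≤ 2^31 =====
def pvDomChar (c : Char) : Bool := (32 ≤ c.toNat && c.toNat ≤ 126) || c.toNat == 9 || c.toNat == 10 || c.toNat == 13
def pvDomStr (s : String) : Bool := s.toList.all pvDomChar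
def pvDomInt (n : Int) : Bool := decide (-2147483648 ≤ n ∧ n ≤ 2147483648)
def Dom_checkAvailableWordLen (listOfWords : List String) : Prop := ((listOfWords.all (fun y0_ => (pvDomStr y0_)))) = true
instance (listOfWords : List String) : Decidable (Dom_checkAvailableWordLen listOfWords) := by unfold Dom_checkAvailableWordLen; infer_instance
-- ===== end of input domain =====

-- B replaces A's dedup-with-membership-scan-then-sort by sort-then-adjacent-dedup (alternative decomposition).

-- ===== PORT A =====
def checkAvailableWordLen (listOfWords : List String) : List Int :=
  let wordLengths : List Int :=
    (PySem.List.pyRange 0 (PySem.List.len listOfWords) 1).foldl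
      (fun wordLengths word =>
        let length := PySem.Str.len (PySem.List.pyGetD listOfWords word "")
        if ¬ (length ∈ wordLengths) then wordLengths ++ [length] else wordLengths)
      []
  PySem.List.sorted wordLengths (fun x => x) false

-- ===== PORT B =====
def checkAvailableWordLen_alt (listOfWords : List String) : List Int :=
  let lengths := PySem.List.sorted (listOfWords.map PySem.Str.len) (fun x => x) false
  lengths.foldl
    (fun result x =>
      if result = [] ∨ PySem.List.pyGetD result (-1) 0 ≠ x then result ++ [x] else result)
    []

-- ===== PRECONDITION & SPEC =====
def Spec_checkAvailableWordLen (listOfWords : List String) (out : List Int) : Prop := out = checkAvailableWordLen_alt listOfWords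
instance (listOfWords : List String) (out : List Int) : Decidable (Spec_checkAvailableWordLen listOfWords out) := by unfold Spec_checkAvailableWordLen; infer_instance

-- ===== CLAIM (what is proved, stated in full; the proofs are below) =====
def Claim_equal_checkAvailableWordLen : Prop := ∀ (listOfWords : List String), Dom_checkAvailableWordLen listOfWords → Spec_checkAvailableWordLen listOfWords (checkAvailableWordLen listOfWords)

-- ===== LEMMAS AND PROOFS =====

-- B's loop body and loop, as standalone names for the proofs
def pvStep (result : List Int) (x : Int) : List Int :=
  if result = [] ∨ PySem.List.pyGetD result (-1) 0 ≠ x then result ++ [x] else result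

def pvF (S acc : List Int) : List Int := S.foldl pvStep acc

lemma pv_mem_F (S : List Int) : ∀ (acc : List Int) (y : Int), y ∈ pvF S acc ↔ y ∈ acc ∨ y ∈ S := by
  induction S with
  | nil => simp [pvF]
  | cons x S ih =>
    intro acc y
    show y ∈ pvF S (pvStep acc x) ↔ _
    rw [ih]
    unfold pvStep
    split_ifs with h
    · simp; tauto
    · push Not at h
      obtain ⟨hne, hlast⟩ := h
      rw [PySem.List.pyGetD_neg_one acc 0 hne] at hlast
      have hx : x ∈ acc := hlast ▸ List.getLast_mem hne
      simp only [List.mem_cons]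
      constructor
      · tauto
      · rintro (h | rfl | h) <;> tauto

lemma pv_le_getLast {l : List Int} (hl : l.Pairwise (· < ·)) {a : Int} (ha : a ∈ l) (h : l ≠ []) :
    a ≤ l.getLast h := by
  induction l with
  | nil => cases ha
  | cons x t ih =>
    cases t with
    | nil => simp at ha; simp [ha]
    | cons z t' =>
      rw [List.getLast_cons (by simp)]
      rcases List.mem_cons.mp ha with rfl | ha'
      · have : a < (z :: t').getLast (by simp) :=
          (List.pairwise_cons.mp hl).1 _ (List.getLast_mem _)
        exact le_of_lt this
      · exact ih (List.pairwise_cons.mp hl).2 ha' (by simp)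

lemma pv_pairwise_F (S : List Int) : ∀ (acc : List Int), S.Pairwise (· ≤ ·) →
    acc.Pairwise (· < ·) → (∀ a ∈ acc, ∀ s ∈ S, a ≤ s) → (pvF S acc).Pairwise (· < ·) := by
  induction S with
  | nil => intro acc _ h _; exact h
  | cons x S ih =>
    intro acc hS hacc hbound
    have hS' := List.pairwise_cons.mp hS
    show ((pvF S (pvStep acc x)).Pairwise (· < ·))
    unfold pvStep
    split_ifs with h
    · apply ih (acc ++ [x]) hS'.2
      · rw [List.pairwise_append]
        refine ⟨hacc, by simp, ?_⟩
        intro a ha b hb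
        simp only [List.mem_singleton] at hb
        rw [hb]
        have hax : a ≤ x := hbound a ha x (by simp)
        rcases h with hnil | hlast
        · simp [hnil] at ha
        · rcases eq_or_lt_of_le hax with rfl | hlt
          · -- a = x : then x ≤ getLast acc, but getLast ≠ x while getLast ≤ x
            by_cases hne : acc = []
            · simp [hne] at ha
            · rw [PySem.List.pyGetD_neg_one acc 0 hne] at hlast
              have h1 : a ≤ acc.getLast hne := pv_le_getLast hacc ha hne
              have h2 : acc.getLast hne ≤ a := hbound _ (List.getLast_mem hne) a (by simp)
              exact absurd (le_antisymm h2 h1) hlast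
          · exact hlt
      · intro a ha s hs
        rcases List.mem_append.mp ha with ha' | ha'
        · exact hbound a ha' s (by simp [hs])
        · simp at ha'; subst ha'
          exact hS'.1 s hs
    · exact ih acc hS'.2 hacc (fun a ha s hs => hbound a ha s (by simp [hs]))

lemma pv_nodup_F (S : List Int) (hS : S.Pairwise (· ≤ ·)) : (pvF S []).Nodup :=
  (pv_pairwise_F S [] hS (by simp) (by simp)).imp ne_of_lt

-- ===== VERDICT (by name: the statement is the Claim_ definition above) =====
theorem checkAvailableWordLen_spec : Claim_equal_checkAvailableWordLen := by
  intro listOfWords _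
  show checkAvailableWordLen listOfWords = checkAvailableWordLen_alt listOfWords
  unfold checkAvailableWordLen checkAvailableWordLen_alt
  set L := listOfWords.map PySem.Str.len with hL
  set S := PySem.List.sorted L (fun x => x) false with hS
  have hA :
      (PySem.List.pyRange 0 (PySem.List.len listOfWords) 1).foldl
        (fun wordLengths word =>
          let length := PySem.Str.len (PySem.List.pyGetD listOfWords word "")
          if ¬ (length ∈ wordLengths) then wordLengths ++ [length] else wordLengths)
        [] = PySem.List.dedup L := by
    rw [PySem.List.foldl_pyRange_zero_pyGetD listOfWords ""
      (fun acc w => if ¬ (PySem.Str.len w ∈ acc) then acc ++ [PySem.Str.len w] else acc) []]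
    have hmap : List.foldl
        (fun acc w => if PySem.Str.len w ∉ acc then acc ++ [PySem.Str.len w] else acc)
        ([] : List Int) listOfWords
        = List.foldl (fun acc x => if x ∉ acc then acc ++ [x] else acc) []
            (listOfWords.map PySem.Str.len) := by rw [List.foldl_map]
    rw [hmap]
    rw [PySem.List.dedup_eq_ofList]
    show L.foldl _ [] = L.foldl PySem.Set.add []
    apply List.foldl_ext
    intro acc x _
    simp only [PySem.Set.add]
    split_ifs <;> simp_all
  simp only [hA]
  have hSord : S.Pairwise (· ≤ ·) := PySem.List.sorted_pairwise L (fun x => x)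
  have hperm : (pvF S []).Perm (PySem.List.dedup L) := by
    rw [List.perm_ext_iff_of_nodup (pv_nodup_F S hSord) (PySem.List.nodup_dedup L)]
    intro y
    rw [pv_mem_F, PySem.List.mem_dedup, hS, PySem.List.mem_sorted]
    simp
  exact PySem.List.sorted_eq_of_perm_of_pairwise_lt _ _ _ hperm
    (pv_pairwise_F S [] hSord (by simp) (by simp))
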